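-- pv_equiv track=rewrite | github.com/EcchiClone/BaekjoonHub | 프로그래머스/0/120843. 공 던지기/공 던지기.py | solution
-- ===== SOURCE A (Python) =====
-- def solution(numbers, k):
--     answer = 0
--     lenp = len(numbers)
--     idx = 0
--     for _ in range(k-1):
--         idx += 2
--         if(idx>=lenp):
--             idx -= lenp
--     answer = idx + 1
--
--     return answer
-- ===== SOURCE B (Python) =====
-- def solution(numbers, k):
--     return 2 * max(k - 1, 0) % len(numbers) + 1
-- ===== Notes on version B (the rewrite author's own statement) =====
-- stated objective: simpler
-- what changed: replaces the k-1-step simulation loop with the closed form 2*max(k-1,0) % len(numbers) + 1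
-- intended difference: on singleton lists with k >= 2 A's single conditional subtraction lets idx grow past the list, returning k, while B returns 1, the only position in a one-person circle — e.g. on solution([7], 3): A returns 3, B returns 1
-- outside the precondition, e.g. on solution([], 3): A returns 5, B raises ZeroDivisionError
import Mathlib
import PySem

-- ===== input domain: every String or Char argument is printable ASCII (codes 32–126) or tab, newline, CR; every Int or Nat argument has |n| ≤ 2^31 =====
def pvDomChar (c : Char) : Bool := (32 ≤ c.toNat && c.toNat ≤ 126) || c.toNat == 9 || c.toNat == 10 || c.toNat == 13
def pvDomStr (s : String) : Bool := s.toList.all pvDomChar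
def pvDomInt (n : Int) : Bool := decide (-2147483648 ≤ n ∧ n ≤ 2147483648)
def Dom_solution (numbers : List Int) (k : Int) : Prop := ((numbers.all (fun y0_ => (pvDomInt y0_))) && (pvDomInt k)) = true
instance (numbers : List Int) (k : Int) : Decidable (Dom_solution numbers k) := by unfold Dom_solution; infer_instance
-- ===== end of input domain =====

-- B replaces A's k-1-step simulation loop with the closed form 2*max(k-1,0) % len(numbers) + 1 (objective: simpler).
-- ===== PORT A =====
def solution (numbers : List Int) (k : Int) : Int :=
  let lenp : Int := numbers.length
  let idx : Int := (List.range (k - 1).toNat).foldl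
    (fun idx _ =>
      let idx := idx + 2
      if idx ≥ lenp then idx - lenp else idx) 0
  idx + 1

-- ===== PORT B =====
def solution_alt (numbers : List Int) (k : Int) : Int :=
  PySem.Int.mod (2 * max (k - 1) 0) (numbers.length : Int) + 1

-- ===== PRECONDITION & SPEC =====
-- Pre_ excludes the empty list, on which B's `% len(numbers)` raises ZeroDivisionError while A returns 2*k-1.
def Pre_solution (numbers : List Int) (k : Int) : Prop := numbers ≠ []
instance (numbers : List Int) (k : Int) : Decidable (Pre_solution numbers k) := by unfold Pre_solution; infer_instance
def pvWitness_solution : List Int × Int := ([1, 2, 3], 4)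

-- On singleton lists with k ≥ 2, A's single conditional subtraction lets idx walk past the list and A returns k,
-- while B returns 1, the only position in a one-person circle — the intended value.
def D_solution (numbers : List Int) (k : Int) : Prop := numbers.length = 1 ∧ 2 ≤ k
instance (numbers : List Int) (k : Int) : Decidable (D_solution numbers k) := by unfold D_solution; infer_instance
def Spec_solution (numbers : List Int) (k : Int) (out : Int) : Prop := ¬ D_solution numbers k → out = solution_alt numbers k
instance (numbers : List Int) (k : Int) (out : Int) : Decidable (Spec_solution numbers k out) := by unfold Spec_solution; infer_instance
def pvDiffWitness_solution : List Int × Int := ([7], 3)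
def pvDiffWitnessOut_solution : Int × Int := (3, 1)

-- ===== CLAIM (what is proved, stated in full; the proofs are below) =====
def Claim_unchanged_solution : Prop := ∀ (numbers : List Int) (k : Int), Dom_solution numbers k → Pre_solution numbers k → Spec_solution numbers k (solution numbers k)
def Claim_changed_solution : Prop := Dom_solution (pvDiffWitness_solution.1) (pvDiffWitness_solution.2) ∧ Pre_solution (pvDiffWitness_solution.1) (pvDiffWitness_solution.2) ∧ D_solution (pvDiffWitness_solution.1) (pvDiffWitness_solution.2) ∧ solution (pvDiffWitness_solution.1) (pvDiffWitness_solution.2) = pvDiffWitnessOut_solution.1 ∧ solution_alt (pvDiffWitness_solution.1) (pvDiffWitness_solution.2) = pvDiffWitnessOut_solution.2 ∧ pvDiffWitnessOut_solution.1 ≠ pvDiffWitnessOut_solution.2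
def Claim_exact_solution : Prop := ∀ (numbers : List Int) (k : Int), Dom_solution numbers k → Pre_solution numbers k → D_solution numbers k → solution numbers k ≠ solution_alt numbers k

-- ===== LEMMAS AND PROOFS =====
def pvStep (L idx : Int) : Int :=
  let idx := idx + 2
  if idx ≥ L then idx - L else idx

theorem pvLoop_ge_two (L : Int) (hL : 2 ≤ L) (n : Nat) :
    (List.range n).foldl (fun idx _ => pvStep L idx) 0 = (2 * (n : Int)) % L := by
  induction n with
  | zero => simp
  | succ n ih =>
    rw [List.range_succ, List.foldl_append, ih]
    have h1 : (0:Int) ≤ 2 * (n : Int) % L := Int.emod_nonneg _ (by omega)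
    have h2 : 2 * (n : Int) % L < L := Int.emod_lt_of_pos _ (by omega)
    have h3 : (2 * ((n:Int) + 1)) % L = (2 * (n:Int) % L + 2) % L := by
      rw [Int.emod_add_emod]; ring_nf
    simp only [List.foldl_cons, List.foldl_nil, pvStep]
    push_cast
    rw [h3]
    generalize 2 * (n : Int) % L = r at h1 h2 ⊢
    by_cases hc : r + 2 ≥ L
    · rw [if_pos hc, ← Int.sub_emod_right (r + 2) L, Int.emod_eq_of_lt (by omega) (by omega)]
    · rw [if_neg hc, Int.emod_eq_of_lt (by omega) (by omega)]

theorem pvLoop_one (n : Nat) :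
    (List.range n).foldl (fun idx _ => pvStep (1:Int) idx) 0 = (n : Int) := by
  induction n with
  | zero => simp
  | succ n ih =>
    rw [List.range_succ, List.foldl_append, ih]
    simp only [List.foldl_cons, List.foldl_nil, pvStep]
    rw [if_pos (by omega)]
    push_cast; ring

theorem solution_eq_loop (numbers : List Int) (k : Int) :
    solution numbers k =
      (List.range (k - 1).toNat).foldl (fun idx _ => pvStep (numbers.length : Int) idx) 0 + 1 := by
  rfl

theorem solution_spec : Claim_unchanged_solution := by
  intro numbers k _ hPre hnD
  have hlen : 1 ≤ numbers.length := by
    cases numbers with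
    | nil => exact absurd rfl hPre
    | cons a t => simp
  rw [solution_eq_loop]
  unfold solution_alt
  rw [PySem.Int.mod_eq_emod_of_pos (by exact_mod_cast hlen)]
  have hmax : ((k - 1).toNat : Int) = max (k - 1) 0 := Int.toNat_eq_max _
  by_cases h1 : numbers.length = 1
  · have hk : k < 2 := by
      by_contra hk
      exact hnD ⟨h1, by omega⟩
    have hz : (k - 1).toNat = 0 := by omega
    rw [hz, h1]
    have : max (k - 1) 0 = 0 := by omega
    simp [this]
  · have hL : 2 ≤ (numbers.length : Int) := by exact_mod_cast (by omega : 2 ≤ numbers.length)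
    rw [pvLoop_ge_two _ hL, hmax]

theorem solution_changed : Claim_changed_solution := by
  unfold Claim_changed_solution; decide

theorem solution_tight : Claim_exact_solution := by
  intro numbers k _ _ hD
  obtain ⟨h1, hk⟩ := hD
  rw [solution_eq_loop, h1]
  unfold solution_alt
  rw [h1]
  have hm : PySem.Int.mod (2 * max (k - 1) 0) ((1:Nat) : Int) = 0 := by
    rw [PySem.Int.mod_eq_emod_of_pos (by norm_num)]
    simp
  rw [hm]
  simp only [Nat.cast_one]
  rw [pvLoop_one]
  have : ((k - 1).toNat : Int) = k - 1 := Int.toNat_of_nonneg (by omega)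
  omega
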